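-- pv_equiv track=rewrite | github.com/jenkins-alex/AdaCGP | src/models/batch/GLSigRep.py | _get_off_diagonal_indices
-- ===== SOURCE A (Python) =====
-- def _get_off_diagonal_indices(n):
--     """Get the indices of off-diagonal elements in vech representation"""
--     offdiag_indices = []
--     idx = 0
--     for i in range(n):
--         for j in range(i, n):
--             if i != j:  # Off-diagonal element
--                 offdiag_indices.append(idx)
--             idx += 1
--     return offdiag_indices
-- ===== SOURCE B (Python) =====
-- def _get_off_diagonal_indices(n):
--     """Get the indices of off-diagonal elements in vech representation"""
--     diag = set()
--     total = 0
--     for i in range(n):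
--         diag.add(total)
--         total += n - i
--     return [k for k in range(total) if k not in diag]
-- ===== Notes on version B (the rewrite author's own statement) =====
-- stated objective: alternative
-- what changed: Instead of A's nested loops emitting off-diagonal indices while counting with a running idx, B makes one pass collecting the set of diagonal start indices and the total count, then returns the complement of that set over range(total).
import Mathlib
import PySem

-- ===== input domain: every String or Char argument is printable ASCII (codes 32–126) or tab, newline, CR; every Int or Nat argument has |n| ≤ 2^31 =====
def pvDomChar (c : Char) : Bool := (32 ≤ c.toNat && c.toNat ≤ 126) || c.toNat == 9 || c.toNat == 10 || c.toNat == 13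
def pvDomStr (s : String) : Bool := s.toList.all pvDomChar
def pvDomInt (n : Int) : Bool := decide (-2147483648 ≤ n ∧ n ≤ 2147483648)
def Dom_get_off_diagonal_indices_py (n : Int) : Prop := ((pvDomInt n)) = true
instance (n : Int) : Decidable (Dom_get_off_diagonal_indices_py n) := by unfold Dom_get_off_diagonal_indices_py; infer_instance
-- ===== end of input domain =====

-- B builds the set of diagonal vech indices in one pass and returns the complement of that
-- set over range(total) — a two-phase table-then-filter strategy instead of A's nested-loop
-- emission; objective: alternative (same O(n^2) cost, different decomposition).

-- ===== PORT A =====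
def get_off_diagonal_indices_py (n : Int) : List Int :=
  -- offdiag_indices = []; idx = 0; for i in range(n): for j in range(i, n): ...
  let st := (PySem.List.pyRange 0 n 1).foldl (fun (st : List Int × Int) i =>
    (PySem.List.pyRange i n 1).foldl (fun (st : List Int × Int) j =>
      ((if i ≠ j then st.1 ++ [st.2] else st.1), st.2 + 1)) st) ([], 0)
  st.1

-- ===== PORT B =====
def get_off_diagonal_indices_py_alt (n : Int) : List Int :=
  -- diag = set(); total = 0; for i in range(n): diag.add(total); total += n - i
  let st := (PySem.List.pyRange 0 n 1).foldl (fun (st : PySem.Set Int × Int) i =>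
    (PySem.Set.add st.1 st.2, st.2 + (n - i))) (PySem.Set.empty, 0)
  -- [k for k in range(total) if k not in diag]
  (PySem.List.pyRange 0 st.2 1).filter (fun k => !(PySem.Set.contains st.1 k))

-- ===== PRECONDITION & SPEC =====
def Spec_get_off_diagonal_indices_py (n : Int) (out : List Int) : Prop := out = get_off_diagonal_indices_py_alt n
instance (n : Int) (out : List Int) : Decidable (Spec_get_off_diagonal_indices_py n out) := by unfold Spec_get_off_diagonal_indices_py; infer_instance

-- ===== CLAIM (what is proved, stated in full; the proofs are below) =====
def Claim_equal_get_off_diagonal_indices_py : Prop := ∀ (n : Int), Dom_get_off_diagonal_indices_py n → Spec_get_off_diagonal_indices_py n (get_off_diagonal_indices_py n)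

-- ===== LEMMAS AND PROOFS =====

-- reference description: triangle number, diagonal start indices, off-diagonal blocks,
-- all parametrised by r = number of rows remaining and idx = current running index
def pvTri : Nat → Int
  | 0 => 0
  | r + 1 => (r + 1 : Int) + pvTri r

def pvStarts : Nat → Int → List Int
  | 0, _ => []
  | r + 1, idx => idx :: pvStarts r (idx + (r + 1 : Int))

def pvBlocks : Nat → Int → List Int
  | 0, _ => []
  | r + 1, idx => PySem.List.pyRange (idx + 1) (idx + (r + 1 : Int)) 1 ++ pvBlocks r (idx + (r + 1 : Int))

theorem pvTri_nonneg (r : Nat) : 0 ≤ pvTri r := by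
  induction r with
  | zero => simp [pvTri]
  | succ r ih => simp only [pvTri]; omega

theorem pvStarts_ge {r : Nat} {m x : Int} (h : x ∈ pvStarts r m) : m ≤ x := by
  induction r generalizing m with
  | zero => simp [pvStarts] at h
  | succ r ih =>
    simp only [pvStarts, List.mem_cons] at h
    rcases h with rfl | h
    · exact le_refl _
    · have := ih h; omega

-- A's inner loop over range(a, b) when every j there differs from i (i < a):
-- it appends idx, idx+1, … and advances idx by b - a.
theorem pvInnerA (i : Int) : ∀ (r : Nat) (a b : Int), b - a = (r : Int) → i < a →
    ∀ (acc : List Int) (idx : Int),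
    (PySem.List.pyRange a b 1).foldl (fun (st : List Int × Int) j =>
      ((if i ≠ j then st.1 ++ [st.2] else st.1), st.2 + 1)) (acc, idx)
      = (acc ++ PySem.List.pyRange idx (idx + (r : Int)) 1, idx + (r : Int)) := by
  intro r
  induction r with
  | zero =>
    intro a b hr _ acc idx
    rw [PySem.List.pyRange_one_eq_nil (by omega), PySem.List.pyRange_one_eq_nil (by omega)]
    simp
  | succ r ih =>
    intro a b hr hia acc idx
    rw [PySem.List.pyRange_one_cons (by omega)]
    simp only [List.foldl_cons]
    rw [if_pos (by omega)]
    rw [ih (a + 1) b (by omega) (by omega)]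
    rw [PySem.List.pyRange_one_cons (a := idx) (by push_cast; omega)]
    rw [show idx + ((r + 1 : Nat) : Int) = idx + 1 + (r : Int) by push_cast; ring]
    simp [List.append_assoc]

-- A's outer loop from row i with r = n - i rows remaining produces the off-diagonal blocks.
theorem pvOuterA (n : Int) : ∀ (r : Nat) (i : Int), n - i = (r : Int) →
    ∀ (acc : List Int) (idx : Int),
    (PySem.List.pyRange i n 1).foldl (fun (st : List Int × Int) i' =>
      (PySem.List.pyRange i' n 1).foldl (fun (st : List Int × Int) j =>
        ((if i' ≠ j then st.1 ++ [st.2] else st.1), st.2 + 1)) st) (acc, idx)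
      = (acc ++ pvBlocks r idx, idx + pvTri r) := by
  intro r
  induction r with
  | zero =>
    intro i hr acc idx
    rw [PySem.List.pyRange_one_eq_nil (by omega)]
    simp [pvBlocks, pvTri]
  | succ r ih =>
    intro i hr acc idx
    rw [PySem.List.pyRange_one_cons (by omega)]
    simp only [List.foldl_cons]
    -- inner loop at row i: first j = i (skipped), then j from i+1 to n-1
    rw [PySem.List.pyRange_one_cons (a := i) (by omega)]
    simp only [List.foldl_cons, ne_eq, not_true_eq_false]
    rw [pvInnerA i r (i + 1) n (by omega) (by omega)]
    rw [ih (i + 1) (by omega)]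
    simp only [pvBlocks, pvTri]
    rw [show idx + ((r : Int) + 1) = idx + 1 + (r : Int) by ring,
        show idx + ((r : Int) + 1 + pvTri r) = idx + 1 + (r : Int) + pvTri r by ring]
    simp [List.append_assoc]

-- B's loop from row i with r = n - i rows remaining collects the diagonal start indices
-- and advances the total by tri r.
theorem pvLoopB (n : Int) : ∀ (r : Nat) (i : Int), n - i = (r : Int) →
    ∀ (s : PySem.Set Int) (idx : Int),
    (PySem.List.pyRange i n 1).foldl (fun (st : PySem.Set Int × Int) i' =>
      (PySem.Set.add st.1 st.2, st.2 + (n - i'))) (s, idx)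
      = (PySem.Set.update s (pvStarts r idx), idx + pvTri r) := by
  intro r
  induction r with
  | zero =>
    intro i hr s idx
    rw [PySem.List.pyRange_one_eq_nil (by omega)]
    simp [pvStarts, pvTri, PySem.Set.update]
  | succ r ih =>
    intro i hr s idx
    rw [PySem.List.pyRange_one_cons (by omega)]
    simp only [List.foldl_cons]
    rw [ih (i + 1) (by omega)]
    have hni : n - i = (r : Int) + 1 := by push_cast at hr; omega
    rw [hni]
    simp only [pvStarts, pvTri, PySem.Set.update, List.foldl_cons]
    simp only [Prod.mk.injEq]
    refine ⟨trivial, by ring⟩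

-- the complement of the start indices inside range(idx, idx + tri r) is exactly the blocks
theorem pvFilterB : ∀ (r : Nat) (idx : Int),
    (PySem.List.pyRange idx (idx + pvTri r) 1).filter
      (fun k => !(decide (k ∈ pvStarts r idx))) = pvBlocks r idx := by
  intro r
  induction r with
  | zero =>
    intro idx
    rw [show idx + pvTri 0 = idx by simp [pvTri], PySem.List.pyRange_one_eq_nil (le_refl idx)]
    simp [pvBlocks]
  | succ r ih =>
    intro idx
    have htri := pvTri_nonneg r
    have hsplit : PySem.List.pyRange idx (idx + pvTri (r + 1)) 1
        = PySem.List.pyRange idx (idx + (r + 1 : Int)) 1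
          ++ PySem.List.pyRange (idx + (r + 1 : Int)) (idx + pvTri (r + 1)) 1 :=
      PySem.List.pyRange_one_append _ _ _ (by omega) (by simp only [pvTri]; omega)
    rw [hsplit, List.filter_append]
    -- first chunk: drop idx (a start), keep idx+1 … idx+r
    rw [PySem.List.pyRange_one_cons (a := idx) (by omega)]
    simp only [List.filter_cons]
    rw [if_neg (by simp [pvStarts])]
    have hchunk1 : (PySem.List.pyRange (idx + 1) (idx + (r + 1 : Int)) 1).filter
        (fun k => !(decide (k ∈ pvStarts (r + 1) idx))) = PySem.List.pyRange (idx + 1) (idx + (r + 1 : Int)) 1 := by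
      apply List.filter_eq_self.mpr
      intro x hx
      rw [PySem.List.mem_pyRange_one] at hx
      simp only [Bool.not_eq_eq_eq_not, Bool.not_true, decide_eq_false_iff_not]
      intro hmem
      simp only [pvStarts, List.mem_cons] at hmem
      rcases hmem with rfl | hmem
      · omega
      · have := pvStarts_ge hmem; omega
    rw [hchunk1]
    have hchunk2 : (PySem.List.pyRange (idx + (r + 1 : Int)) (idx + pvTri (r + 1)) 1).filter
        (fun k => !(decide (k ∈ pvStarts (r + 1) idx)))
        = (PySem.List.pyRange (idx + (r + 1 : Int)) (idx + pvTri (r + 1)) 1).filter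
          (fun k => !(decide (k ∈ pvStarts r (idx + (r + 1 : Int))))) := by
      apply List.filter_congr
      intro x hx
      rw [PySem.List.mem_pyRange_one] at hx
      simp only [pvStarts, List.mem_cons]
      have : ¬ (x = idx) := by omega
      simp [this]
    rw [hchunk2]
    have : idx + pvTri (r + 1) = (idx + (r + 1 : Int)) + pvTri r := by
      simp only [pvTri]; omega
    rw [this, ih]
    simp only [pvBlocks]

theorem pvContains_update_empty (l : List Int) (k : Int) :
    PySem.Set.contains (PySem.Set.update PySem.Set.empty l) k = decide (k ∈ l) := by
  simp only [PySem.Set.contains_eq_listContains, List.contains_eq_mem]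
  rw [decide_eq_decide, PySem.Set.mem_update]
  simp [PySem.Set.empty]

-- ===== VERDICT (by name: the statement is the Claim_ definition above) =====
theorem get_off_diagonal_indices_py_spec : Claim_equal_get_off_diagonal_indices_py := by
  intro n _
  unfold Spec_get_off_diagonal_indices_py get_off_diagonal_indices_py get_off_diagonal_indices_py_alt
  by_cases hn : n ≤ 0
  · rw [PySem.List.pyRange_one_eq_nil (by omega)]
    simp
  · have hr : n - 0 = ((n.toNat : Nat) : Int) := by omega
    rw [pvOuterA n n.toNat 0 hr, pvLoopB n n.toNat 0 hr]
    simp only [List.nil_append, zero_add]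
    have : (fun k => !(PySem.Set.contains (PySem.Set.update PySem.Set.empty (pvStarts n.toNat 0)) k))
        = (fun k => !(decide (k ∈ pvStarts n.toNat 0))) := by
      funext k; rw [pvContains_update_empty]
    rw [this]
    have h2 := pvFilterB n.toNat 0
    rw [zero_add] at h2
    exact h2.symm
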